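-- pv_equiv track=rewrite | github.com/yankyn/ipuyol | IPython/extensions/orm_extension/orm_completer.py | open_criterion_call_indices
-- ===== SOURCE A (Python) =====
-- def open_criterion_call_indices(calls):
--     closed_call_indices = set()
--     count = 0
--     for call in calls:
--         for i in range(call.count(')')):
--             closed_call_indices.add(count - i - 1)
--         count += 1
--     all_call_indices = set(range(len(calls) - 1))
--     open_call_indices = all_call_indices.difference(closed_call_indices)
--     return open_call_indices
-- ===== SOURCE B (Python) =====
-- def open_criterion_call_indices(calls):
--     # Right-to-left scan: m = smallest index closed by any call seen so far
--     # (len(calls) acts as "nothing closed yet"); index k-1 is open iff m > k-1.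
--     n = len(calls)
--     m = n
--     res = []
--     for k in reversed(range(1, n)):
--         c = calls[k].count(')')
--         if c and k - c < m:
--             m = k - c
--         if m > k - 1:
--             res.append(k - 1)
--     res.reverse()
--     return set(res)
-- ===== Notes on version B (the rewrite author's own statement) =====
-- stated objective: alternative
-- what changed: Instead of inserting every index closed by each ')' into a set and taking a set difference over range(len-1), B does one right-to-left pass over the calls keeping only the minimum index closed by the calls seen so far, emitting each open index directly.
import Mathlib
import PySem

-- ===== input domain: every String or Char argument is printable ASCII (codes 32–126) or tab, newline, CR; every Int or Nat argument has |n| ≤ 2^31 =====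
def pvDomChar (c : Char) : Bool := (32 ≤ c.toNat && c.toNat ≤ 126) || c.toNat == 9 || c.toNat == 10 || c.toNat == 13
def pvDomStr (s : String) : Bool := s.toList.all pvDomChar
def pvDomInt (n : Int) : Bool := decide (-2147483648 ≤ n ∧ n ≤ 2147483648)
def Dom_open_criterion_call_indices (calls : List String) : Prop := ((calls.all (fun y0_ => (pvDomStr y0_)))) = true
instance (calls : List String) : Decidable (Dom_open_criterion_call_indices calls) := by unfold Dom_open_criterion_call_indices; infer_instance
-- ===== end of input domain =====

-- B replaces A's per-')' set insertions and set difference by a single right-to-left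
-- scan keeping the minimum closed index seen so far (objective: alternative algorithm).


-- ===== PORT A =====
-- loop body of A's outer 'for call in calls' loop (state: (closed_call_indices, count))
def pvStepA (st : PySem.Set Int × Int) (call : String) : PySem.Set Int × Int :=
  ((PySem.List.pyRange 0 ((PySem.Str.count call ")" : Nat) : Int) 1).foldl
      (fun s i => PySem.Set.add s (st.2 - i - 1)) st.1,
   st.2 + 1)

def open_criterion_call_indices (calls : List String) : List Int :=
  let st := calls.foldl pvStepA (PySem.Set.empty, 0)
  let all_call_indices := PySem.Set.ofList (PySem.List.pyRange 0 (PySem.List.len calls - 1) 1)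
  PySem.Set.diff all_call_indices st.1

-- ===== PORT B =====
-- loop body of B's 'for k in reversed(range(1, n))' loop (state: (m, res))
def pvStepB (calls : List String) (st : Int × List Int) (k : Int) : Int × List Int :=
  let c : Int := ((PySem.Str.count (PySem.List.pyGetD calls k "") ")" : Nat) : Int)
  let m : Int := if c ≠ 0 ∧ k - c < st.1 then k - c else st.1
  (m, if k - 1 < m then st.2 ++ [k - 1] else st.2)

def open_criterion_call_indices_alt (calls : List String) : List Int :=
  let n : Int := PySem.List.len calls
  let st := ((PySem.List.pyRange 1 n 1).reverse).foldl (pvStepB calls) (n, [])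
  PySem.Set.ofList st.2.reverse

-- ===== PRECONDITION & SPEC =====
def Spec_open_criterion_call_indices (calls : List String) (out : List Int) : Prop := out = open_criterion_call_indices_alt calls
instance (calls : List String) (out : List Int) : Decidable (Spec_open_criterion_call_indices calls out) := by unfold Spec_open_criterion_call_indices; infer_instance

-- ===== CLAIM (what is proved, stated in full; the proofs are below) =====
def Claim_equal_open_criterion_call_indices : Prop := ∀ (calls : List String), Dom_open_criterion_call_indices calls → Spec_open_criterion_call_indices calls (open_criterion_call_indices calls)

-- ===== LEMMAS AND PROOFS =====

-- number of ')' in a call, as an Int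
def pvCnt (s : String) : Int := ((PySem.Str.count s ")" : Nat) : Int)

-- "index i is closed by some call with index k ≥ lo"
def pvClosedB (calls : List String) (lo i : Int) : Bool :=
  (List.range calls.length).any
    (fun k => decide (lo ≤ (k : Int) ∧ (k : Int) - pvCnt (calls.getD k "") ≤ i))

def pvPcl (calls : List String) (lo i : Int) : Prop :=
  ∃ k : Nat, k < calls.length ∧ lo ≤ (k : Int) ∧ (k : Int) - pvCnt (calls.getD k "") ≤ i

lemma pvClosedB_iff (calls : List String) (lo i : Int) :
    pvClosedB calls lo i = true ↔ pvPcl calls lo i := by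
  simp [pvClosedB, pvPcl, List.any_eq_true, List.mem_range]

-- the common specification: open indices, in increasing order
def pvSpecList (calls : List String) : List Int :=
  (PySem.List.pyRange 0 ((calls.length : Int) - 1) 1).filter
    (fun i => !pvClosedB calls (i + 1) i)

-- ===== A-side lemmas =====

lemma pvMemInner (c0 : Int) (c : Nat) (s : PySem.Set Int) (i : Int) :
    i ∈ (PySem.List.pyRange 0 (c : Int) 1).foldl (fun s j => PySem.Set.add s (c0 - j - 1)) s
      ↔ i ∈ s ∨ (c0 - c ≤ i ∧ i ≤ c0 - 1) := by
  rw [← PySem.Set.update_map_eq_foldl_add, PySem.Set.mem_update]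
  constructor
  · rintro (h | h)
    · exact Or.inl h
    · rcases List.mem_map.mp h with ⟨j, hj, rfl⟩
      rcases PySem.List.mem_pyRange_one.mp hj with ⟨h1, h2⟩
      exact Or.inr ⟨by omega, by omega⟩
  · rintro (h | ⟨h1, h2⟩)
    · exact Or.inl h
    · refine Or.inr (List.mem_map.mpr ⟨c0 - i - 1, PySem.List.mem_pyRange_one.mpr ⟨by omega, by omega⟩, by omega⟩)

lemma pvMemOuter (calls : List String) (s : PySem.Set Int) (c0 : Int) (i : Int) :
    i ∈ (calls.foldl pvStepA (s, c0)).1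
      ↔ i ∈ s ∨ ∃ k : Nat, k < calls.length ∧
          c0 + k - pvCnt (calls.getD k "") ≤ i ∧ i ≤ c0 + k - 1 := by
  induction calls generalizing s c0 with
  | nil => simp
  | cons a l ih =>
    have hstep : (a :: l).foldl pvStepA (s, c0) = l.foldl pvStepA (pvStepA (s, c0) a) := rfl
    rw [hstep]
    have := ih ((PySem.List.pyRange 0 ((PySem.Str.count a ")" : Nat) : Int) 1).foldl
        (fun s i => PySem.Set.add s (c0 - i - 1)) s) (c0 + 1)
    rw [show pvStepA (s, c0) a = ((PySem.List.pyRange 0 ((PySem.Str.count a ")" : Nat) : Int) 1).foldl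
        (fun s i => PySem.Set.add s (c0 - i - 1)) s, c0 + 1) from rfl, this,
      pvMemInner c0 (PySem.Str.count a ")") s i]
    constructor
    · rintro ((h | ⟨h1, h2⟩) | ⟨k, hk, h1, h2⟩)
      · exact Or.inl h
      · exact Or.inr ⟨0, by simp, by simpa [pvCnt] using h1, by omega⟩
      · refine Or.inr ⟨k + 1, by simpa using hk, ?_, ?_⟩ <;>
          · simp only [List.getD_cons_succ] at *
            push_cast at *
            omega
    · rintro (h | ⟨k, hk, h1, h2⟩)
      · exact Or.inl (Or.inl h)
      · cases k with
        | zero =>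
          refine Or.inl (Or.inr ⟨by simpa [pvCnt] using h1, by omega⟩)
        | succ k =>
          refine Or.inr ⟨k, by simpa using hk, ?_, ?_⟩ <;>
            · simp only [List.getD_cons_succ] at *
              push_cast at *
              omega

lemma pvA_eq (calls : List String) :
    open_criterion_call_indices calls = pvSpecList calls := by
  unfold open_criterion_call_indices pvSpecList
  have hall : PySem.Set.ofList (PySem.List.pyRange 0 (PySem.List.len calls - 1) 1)
      = PySem.List.pyRange 0 ((calls.length : Int) - 1) 1 := by
    rw [PySem.Set.ofList_eq_self_of_nodup _ (PySem.List.nodup_pyRange_one _ _)]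
    simp [PySem.List.len]
  show PySem.Set.diff _ _ = _
  rw [hall]
  unfold PySem.Set.diff
  apply List.filter_congr
  intro i hi
  congr 1
  rw [Bool.eq_iff_iff]
  simp only [PySem.Set.contains_eq_listContains, List.contains_iff_mem]
  rw [pvMemOuter, pvClosedB_iff]
  simp only [PySem.Set.empty, List.not_mem_nil, false_or]
  unfold pvPcl
  constructor
  · rintro ⟨k, hk, h1, h2⟩; exact ⟨k, hk, by omega, by omega⟩
  · rintro ⟨k, hk, h1, h2⟩; exact ⟨k, hk, by omega, by omega⟩

-- ===== B-side lemmas =====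

lemma pvBfoldr (calls : List String) (j : Nat) :
    ∀ K : Int, 1 ≤ K → K ≤ (calls.length : Int) → (calls.length : Int) - K = j →
    (∀ i : Int, i < K →
        ((i < ((PySem.List.pyRange K (calls.length : Int) 1).foldr
            (fun k st => pvStepB calls st k) ((calls.length : Int), [])).1)
          ↔ ¬ pvPcl calls K i)) ∧
    ((PySem.List.pyRange K (calls.length : Int) 1).foldr
        (fun k st => pvStepB calls st k) ((calls.length : Int), [])).2
      = ((PySem.List.pyRange (K - 1) ((calls.length : Int) - 1) 1).filter
          (fun i => !pvClosedB calls (i + 1) i)).reverse := by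
  induction j with
  | zero =>
    intro K h1 h2 hj
    have hKn : K = (calls.length : Int) := by omega
    subst hKn
    rw [PySem.List.pyRange_one_eq_nil (le_refl _),
      PySem.List.pyRange_one_eq_nil (by omega)]
    refine ⟨fun i hi => ?_, rfl⟩
    simp only [List.foldr_nil]
    constructor
    · rintro _ ⟨k, hk, hk1, _⟩
      have : (k : Int) < (calls.length : Int) := by exact_mod_cast hk
      omega
    · intro _; exact hi
  | succ j ih =>
    intro K h1 h2 hj
    have hKn : K < (calls.length : Int) := by omega
    rw [PySem.List.pyRange_one_cons hKn]
    simp only [List.foldr_cons]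
    obtain ⟨ihm, ihres⟩ := ih (K + 1) (by omega) (by omega) (by omega)
    set st' := (PySem.List.pyRange (K + 1) (calls.length : Int) 1).foldr
        (fun k st => pvStepB calls st k) ((calls.length : Int), []) with hst'
    -- the call at index K
    have hKnat : ((K.toNat : Nat) : Int) = K := Int.toNat_of_nonneg (by omega)
    have hget : PySem.List.pyGetD calls K "" = calls.getD K.toNat "" := by
      rw [← hKnat, PySem.List.pyGetD_natCast]
      have hmax : max K 0 = K := by omega
      simp [hmax]
    have hc : ((PySem.Str.count (PySem.List.pyGetD calls K "") ")" : Nat) : Int)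
        = pvCnt (calls.getD K.toNat "") := by rw [hget]; rfl
    -- splitting the closing condition at k = K
    have hsplit : ∀ i : Int, pvPcl calls K i ↔
        (pvPcl calls (K + 1) i ∨ K - pvCnt (calls.getD K.toNat "") ≤ i) := by
      intro i
      constructor
      · rintro ⟨k, hk, hk1, hk2⟩
        by_cases hEq : (k : Int) = K
        · right; rw [show K.toNat = k by omega]; omega
        · left; exact ⟨k, hk, by omega, hk2⟩
      · rintro (⟨k, hk, hk1, hk2⟩ | h)
        · exact ⟨k, hk, by omega, hk2⟩
        · refine ⟨K.toNat, by omega, by omega, by omega⟩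
    -- the updated minimum
    have hm : ∀ i : Int, i < K →
        ((i < (pvStepB calls st' K).1) ↔ ¬ pvPcl calls K i) := by
      intro i hi
      have hIH := ihm i (by omega)
      rw [hsplit i]
      unfold pvStepB
      simp only
      rw [hc]
      split_ifs with h
      · push_neg
        constructor
        · intro hlt
          exact ⟨(ihm i (by omega)).mp (by omega) , by omega⟩
        · rintro ⟨hp, hle⟩
          have := (ihm i (by omega)).mpr hp
          omega
      · push_neg
        constructor
        · intro hlt
          refine ⟨(ihm i (by omega)).mp hlt, ?_⟩
          rcases h with h
          by_cases hc0 : pvCnt (calls.getD K.toNat "") = 0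
          · omega
          · have : ¬ (K - pvCnt (calls.getD K.toNat "") < st'.1) := by tauto
            omega
        · rintro ⟨hp, _⟩
          exact (ihm i (by omega)).mpr hp
      -- both branches done
    refine ⟨hm, ?_⟩
    -- the result list
    rw [show K + 1 - 1 = K by ring] at ihres
    have htest : (K - 1 < (pvStepB calls st' K).1) ↔ ¬ pvPcl calls K (K - 1) :=
      hm (K - 1) (by omega)
    have hsnd : (pvStepB calls st' K).2
        = if K - 1 < (pvStepB calls st' K).1 then st'.2 ++ [K - 1] else st'.2 := rfl
    rw [hsnd, ihres,
      show PySem.List.pyRange (K - 1) ((calls.length : Int) - 1) 1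
          = (K - 1) :: PySem.List.pyRange K ((calls.length : Int) - 1) 1 from by
        rw [PySem.List.pyRange_one_cons (by omega), show K - 1 + 1 = K by ring],
      List.filter_cons]
    by_cases hop : pvPcl calls K (K - 1)
    · have hcond : ¬ ((!pvClosedB calls (K - 1 + 1) (K - 1)) = true) := by
        rw [show K - 1 + 1 = K by ring, Bool.not_eq_true, Bool.not_eq_false']
        exact (pvClosedB_iff calls K (K - 1)).mpr hop
      rw [if_neg (fun hlt => (htest.mp hlt) hop), if_neg hcond]
    · have hb : (!pvClosedB calls (K - 1 + 1) (K - 1)) = true := by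
        rw [show K - 1 + 1 = K by ring, Bool.not_eq_true', ← Bool.not_eq_true, pvClosedB_iff]
        exact hop
      rw [if_pos (htest.mpr hop), if_pos hb, List.reverse_cons]


lemma pvB_eq (calls : List String) :
    open_criterion_call_indices_alt calls = pvSpecList calls := by
  rcases calls with _ | ⟨a, l⟩
  · rfl
  · set calls := a :: l with hcalls
    have hn : (1 : Int) ≤ (calls.length : Int) := by simp [hcalls]
    show PySem.Set.ofList
        ((((PySem.List.pyRange 1 (PySem.List.len calls) 1).reverse).foldl (pvStepB calls)
          (PySem.List.len calls, [])).2).reverse = pvSpecList calls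
    rw [show PySem.List.len calls = (calls.length : Int) from by simp [PySem.List.len],
      List.foldl_reverse]
    obtain ⟨_, hres⟩ := pvBfoldr calls ((calls.length : Int) - 1).toNat 1 le_rfl hn (by omega)
    rw [hres, show (1 : Int) - 1 = 0 by ring, List.reverse_reverse]
    unfold pvSpecList
    exact PySem.Set.ofList_eq_self_of_nodup _
      ((PySem.List.nodup_pyRange_one _ _).filter _)

-- ===== VERDICT (by name: the statement is the Claim_ definition above) =====
theorem open_criterion_call_indices_spec : Claim_equal_open_criterion_call_indices := by
  intro calls _
  unfold Spec_open_criterion_call_indices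
  rw [pvA_eq, pvB_eq]
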